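-- pv_equiv track=rewrite | github.com/seanschneidewent/Maestro-Super | services/api/scripts/evaluate_fast_mode.py | _sheet_number_hit
-- ===== SOURCE A (Python) =====
-- def _normalize(value: str) -> str:
--     return " ".join("".join(ch.lower() if ch.isalnum() else " " for ch in str(value or "")).split())
--
-- def _sheet_number_hit(predicted_names: list[str], expected_sheet_numbers: list[str], k: int) -> bool | None:
--     if not expected_sheet_numbers:
--         return None
--     top_k = [_normalize(name) for name in predicted_names[:k]]
--     expected = [_normalize(num) for num in expected_sheet_numbers if _normalize(num)]
--     for number in expected:
--         if any(number in name for name in top_k):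
--             return True
--     return False
-- ===== SOURCE B (Python) =====
-- def _normalize(value: str) -> str:
--     return " ".join("".join(ch.lower() if ch.isalnum() else " " for ch in str(value or "")).split())
--
-- def _sheet_number_hit(predicted_names: list[str], expected_sheet_numbers: list[str], k: int) -> bool | None:
--     if not expected_sheet_numbers:
--         return None
--     # Index the patterns in a hash set and slide fixed-length windows over each
--     # normalized name: a window hits iff some expected number occurs in some name.
--     patterns = {_normalize(num) for num in expected_sheet_numbers if _normalize(num)}
--     lengths = {len(p) for p in patterns}
--     for name in predicted_names[:k]:
--         text = _normalize(name)
--         for L in lengths: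
--             for i in range(len(text) - L + 1):
--                 if text[i:i + L] in patterns:
--                     return True
--     return False
-- ===== Notes on version B (the rewrite author's own statement) =====
-- stated objective: alternative
-- what changed: B indexes the normalized expected numbers in a hash set, then slides fixed-length windows (one per distinct pattern length) over each normalized name and tests each window for set membership, instead of A's per-pattern substring scan over the name list.
import Mathlib
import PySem

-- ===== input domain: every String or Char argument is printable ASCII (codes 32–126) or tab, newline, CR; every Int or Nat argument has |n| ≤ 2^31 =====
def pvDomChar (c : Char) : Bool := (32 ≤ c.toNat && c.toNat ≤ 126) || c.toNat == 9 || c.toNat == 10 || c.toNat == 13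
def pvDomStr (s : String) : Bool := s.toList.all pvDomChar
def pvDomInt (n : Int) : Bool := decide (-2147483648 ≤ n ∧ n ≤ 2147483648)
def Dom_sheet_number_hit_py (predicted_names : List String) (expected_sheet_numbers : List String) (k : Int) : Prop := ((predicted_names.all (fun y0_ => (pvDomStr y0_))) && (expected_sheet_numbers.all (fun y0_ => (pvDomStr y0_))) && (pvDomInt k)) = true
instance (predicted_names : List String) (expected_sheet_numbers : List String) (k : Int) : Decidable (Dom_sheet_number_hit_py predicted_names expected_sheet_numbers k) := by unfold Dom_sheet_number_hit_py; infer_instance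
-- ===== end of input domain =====

-- B indexes the normalized expected numbers in a hash set and slides fixed-length windows over
-- each normalized name, instead of A's per-pattern substring scan over the name list (alternative; no speed claim).

-- ===== PORT A =====
-- _normalize, the module helper shared by both Python versions (exact via PySem.Chars)
def pvNormChars (s : List Char) : List Char :=
  PySem.Chars.join [' ']
    (PySem.Chars.split₀ (s.map (fun ch => if PySem.Chars.isalnum ch then PySem.Chars.lowerChar ch else ' ')))

-- A's 'for number in expected: if any(...): return True / return False' loop
def pvHitLoop (expected : List (List Char)) (top_k : List (List Char)) : Option Bool :=
  match expected with
  | [] => some false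
  | n :: rest =>
    if top_k.any (fun name => PySem.Chars.isIn n name) then some true else pvHitLoop rest top_k

def sheet_number_hit_py (predicted_names : List String) (expected_sheet_numbers : List String) (k : Int) : Option Bool :=
  if expected_sheet_numbers = [] then none
  else
    let top_k := (PySem.List.slice predicted_names none (some k)).map (fun name => pvNormChars name.toList)
    let expected := (expected_sheet_numbers.map (fun num => pvNormChars num.toList)).filter (fun n => !n.isEmpty)
    pvHitLoop expected top_k

-- ===== PORT B =====
-- B's nested 'for name / for L in lengths / for i in range(...)' with early return True, else False
-- (the result is order-independent — an existence test — so consuming the sets with 'any' is exact)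
def pvAltLoop (names : List String) (lengths : PySem.Set Int) (patterns : PySem.Set (List Char)) : Bool :=
  names.any (fun name =>
    let text := pvNormChars name.toList
    lengths.any (fun L =>
      (PySem.List.pyRange 0 ((text.length : Int) - L + 1) 1).any (fun i =>
        decide (PySem.List.slice text (some i) (some (i + L)) ∈ patterns))))

def sheet_number_hit_py_alt (predicted_names : List String) (expected_sheet_numbers : List String) (k : Int) : Option Bool :=
  if expected_sheet_numbers = [] then none
  else
    let patterns : PySem.Set (List Char) :=
      PySem.Set.ofList ((expected_sheet_numbers.map (fun num => pvNormChars num.toList)).filter (fun n => !n.isEmpty))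
    let lengths : PySem.Set Int := PySem.Set.ofList (patterns.map (fun p => (p.length : Int)))
    some (pvAltLoop (PySem.List.slice predicted_names none (some k)) lengths patterns)

-- ===== PRECONDITION & SPEC =====
def Spec_sheet_number_hit_py (predicted_names : List String) (expected_sheet_numbers : List String) (k : Int) (out : Option Bool) : Prop := out = sheet_number_hit_py_alt predicted_names expected_sheet_numbers k
instance (predicted_names : List String) (expected_sheet_numbers : List String) (k : Int) (out : Option Bool) : Decidable (Spec_sheet_number_hit_py predicted_names expected_sheet_numbers k out) := by unfold Spec_sheet_number_hit_py; infer_instance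

-- ===== CLAIM (what is proved, stated in full; the proofs are below) =====
def Claim_equal_sheet_number_hit_py : Prop := ∀ (predicted_names : List String) (expected_sheet_numbers : List String) (k : Int), Dom_sheet_number_hit_py predicted_names expected_sheet_numbers k → Spec_sheet_number_hit_py predicted_names expected_sheet_numbers k (sheet_number_hit_py predicted_names expected_sheet_numbers k)

-- ===== LEMMAS AND PROOFS =====

theorem pvHitLoop_eq_any (expected top_k : List (List Char)) :
    pvHitLoop expected top_k =
      some (expected.any (fun n => top_k.any (fun name => PySem.Chars.isIn n name))) := by
  induction expected with
  | nil => rfl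
  | cons n rest ih =>
    unfold pvHitLoop
    by_cases h : top_k.any (fun name => PySem.Chars.isIn n name) = true
    · simp [h]
    · simp only [Bool.not_eq_true] at h
      simp [h, ih]

-- a window of the sliding scan is an infix
theorem pvSlice_infix (t : List Char) (i L : Int) :
    PySem.List.slice t (some i) (some (i + L)) <:+: t := by
  unfold PySem.List.slice
  exact ((List.take_prefix _ _).isInfix).trans (List.drop_suffix _ _).isInfix

-- an infix of t of length n.length is some window of the scan, and conversely
theorem pvWindow_scan (t n : List Char) :
    ((PySem.List.pyRange 0 ((t.length : Int) - (n.length : Int) + 1) 1).any (fun i =>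
        decide (PySem.List.slice t (some i) (some (i + (n.length : Int))) = n))) = true
      ↔ n <:+: t := by
  constructor
  · intro h
    obtain ⟨i, _, hw⟩ := List.any_eq_true.mp h
    have hw' := of_decide_eq_true hw
    rw [← hw']; exact pvSlice_infix t i _
  · intro h
    obtain ⟨s, u, hsu⟩ := h
    apply List.any_eq_true.mpr
    refine ⟨(s.length : Int), ?_, ?_⟩
    · rw [PySem.List.mem_pyRange_one]
      constructor
      · positivity
      · have : s.length + n.length ≤ t.length := by
          rw [← hsu]; simp [List.length_append]
        omega
    · apply decide_eq_true
      rw [PySem.List.slice_natCast_add]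
      rw [← hsu, List.append_assoc, List.drop_left, List.take_left]

-- the inner two loops of B find a pattern iff some pattern is an infix of the text
theorem pvInner_iff (text : List Char) (pats : List (List Char)) :
    (∃ L ∈ PySem.Set.ofList ((PySem.Set.ofList pats).map (fun p => (p.length : Int))),
      ∃ i ∈ PySem.List.pyRange 0 ((text.length : Int) - L + 1) 1,
        decide (PySem.List.slice text (some i) (some (i + L)) ∈ PySem.Set.ofList pats) = true)
    ↔ ∃ n ∈ pats, PySem.Chars.isIn n text = true := by
  simp only [PySem.Chars.isIn_iff_infix]
  constructor
  · rintro ⟨L, -, i, hi, hmem⟩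
    have hmem' := of_decide_eq_true hmem
    refine ⟨_, (PySem.Set.mem_ofList pats _).mp hmem', pvSlice_infix text i L⟩
  · rintro ⟨n, hn, hinf⟩
    refine ⟨(n.length : Int), ?_, ?_⟩
    · exact (PySem.Set.mem_ofList _ _).mpr
        (List.mem_map.mpr ⟨n, (PySem.Set.mem_ofList pats n).mpr hn, rfl⟩)
    · obtain ⟨i, hi, hw⟩ := List.any_eq_true.mp
        ((pvWindow_scan text n).mpr hinf)
      refine ⟨i, hi, ?_⟩
      apply decide_eq_true
      rw [of_decide_eq_true hw]
      exact (PySem.Set.mem_ofList pats n).mpr hn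

-- ===== VERDICT (by name: the statement is the Claim_ definition above) =====
theorem sheet_number_hit_py_spec : Claim_equal_sheet_number_hit_py := by
  intro p e k _
  unfold Spec_sheet_number_hit_py sheet_number_hit_py sheet_number_hit_py_alt
  by_cases he : e = []
  · simp [he]
  · simp only [he, ite_false]
    rw [pvHitLoop_eq_any]
    congr 1
    unfold pvAltLoop
    set pats := (e.map (fun num => pvNormChars num.toList)).filter (fun n => !n.isEmpty)
    rw [Bool.eq_iff_iff]
    simp only [List.any_map, List.any_eq_true, Function.comp]
    simp only [pvInner_iff _ pats]
    constructor
    · rintro ⟨n, hn, name, hname, hin⟩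
      exact ⟨name, hname, n, hn, hin⟩
    · rintro ⟨name, hname, n, hn, hin⟩
      exact ⟨n, hn, name, hname, hin⟩
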